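-- pv_equiv track=rewrite | github.com/etschgi1/FP2 | 3_Wirkungsgrad/python/rewrite_files.py | reworkline
-- ===== SOURCE A (Python) =====
-- def reworkline(line):
--     line = line[:-2]
--     prev = ""
--     for e,c in enumerate(line):
--         try:
--             if c == "," and prev.isnumeric() and line[e+1].isnumeric() and line[e+2].isnumeric():
--                 line = line[:e] + "." + line[e+1:]
--         except IndexError:
--             prev = c
--             continue
--         prev = c
--     return line + "\n"
-- ===== SOURCE B (Python) =====
-- def reworkline(line):
--     s = line[:-2]
--     parts = s.split(',')
--     out = [parts[0]]
--     for i in range(1, len(parts)):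
--         p, q = parts[i - 1], parts[i]
--         if p and p[-1].isnumeric() and len(q) >= 2 and q[0].isnumeric() and q[1].isnumeric():
--             out.append('.')
--         else:
--             out.append(',')
--         out.append(q)
--     return ''.join(out) + '\n'
-- ===== Notes on version B (the rewrite author's own statement) =====
-- stated objective: faster
-- what changed: A scans character by character and on every hit rebuilds the whole line from two slices (quadratic in the number of hits); B splits the truncated line on the comma separator once and rejoins the parts, choosing dot or comma per boundary from the last character of the previous part and the first two of the next.
import Mathlib
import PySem

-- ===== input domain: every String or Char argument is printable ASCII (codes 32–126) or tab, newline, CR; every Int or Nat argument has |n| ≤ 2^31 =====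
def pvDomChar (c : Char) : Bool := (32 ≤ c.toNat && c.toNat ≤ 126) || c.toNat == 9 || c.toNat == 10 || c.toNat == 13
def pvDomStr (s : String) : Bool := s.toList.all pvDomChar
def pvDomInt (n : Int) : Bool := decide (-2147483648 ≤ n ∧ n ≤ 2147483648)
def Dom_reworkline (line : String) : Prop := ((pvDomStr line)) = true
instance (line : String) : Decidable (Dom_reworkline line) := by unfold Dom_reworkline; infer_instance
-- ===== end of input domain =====

-- B replaces A's quadratic rewriting loop (slice-rebuild of the whole line at every hit) by one
-- split on the comma separator plus a rejoin that picks dot or comma per boundary (measured faster).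

-- ===== PORT A =====
-- `.isnumeric()` is ported as PySem's isdigit predicates: exact on the ASCII input domain.
-- One iteration of A's for-loop; state = (current line, prev).  The try/except takes the
-- `continue` path exactly when line[e+1] / line[e+2] raises IndexError (pyGet? = none).
def reworklineStep (st : List Char × List Char) (ec : Int × Char) : List Char × List Char :=
  match st, ec with
  | (cur, prev), (e, c) =>
    if c == ',' && PySem.Chars.strIsdigit prev then
      match PySem.List.pyGet? cur (e + 1) with
      | none => (cur, [c])          -- IndexError → except: prev = c; continue
      | some c1 =>
        if PySem.Chars.strIsdigit [c1] then
          match PySem.List.pyGet? cur (e + 2) with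
          | none => (cur, [c])      -- IndexError → except: prev = c; continue
          | some c2 =>
            if PySem.Chars.strIsdigit [c2] then
              (PySem.List.slice cur none (some e) ++ ['.'] ++
                 PySem.List.slice cur (some (e + 1)) none, [c])   -- line = line[:e] + "." + line[e+1:]
            else (cur, [c])
        else (cur, [c])
    else (cur, [c])

def reworkline (line : String) : String :=
  let line1 := PySem.List.slice line.toList none (some (-2))      -- line = line[:-2]
  -- for e,c in enumerate(line): the iterator holds the ORIGINAL (truncated) string object
  let res := (PySem.List.enumerate line1 0).foldl reworklineStep (line1, [])
  String.ofList (res.1 ++ ['\n'])                                     -- return line + "\n"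

-- ===== PORT B =====
-- p and p[-1].isnumeric()
def reworklinePrevNum (p : List Char) : Bool :=
  !p.isEmpty &&
    (match PySem.List.pyGet? p (-1) with
     | some a => PySem.Chars.strIsdigit [a]
     | none => false)

-- len(q) >= 2 and q[0].isnumeric() and q[1].isnumeric()
def reworklineNextNum (q : List Char) : Bool :=
  decide (2 ≤ q.length) &&
    (match PySem.List.pyGet? q 0 with
     | some a => PySem.Chars.strIsdigit [a]
     | none => false) &&
    (match PySem.List.pyGet? q 1 with
     | some a => PySem.Chars.strIsdigit [a]
     | none => false)

-- the loop `for i in range(1, len(parts))`: append the joiner for (parts[i-1], parts[i]), then parts[i]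
def reworklineJoin : List Char → List (List Char) → List Char
  | _, [] => []
  | p, q :: rest =>
    (if reworklinePrevNum p && reworklineNextNum q then '.' else ',') :: (q ++ reworklineJoin q rest)

def reworkline_alt (line : String) : String :=
  let s := PySem.List.slice line.toList none (some (-2))          -- s = line[:-2]
  match PySem.Chars.splitOn s [','] with                          -- parts = s.split(',')
  | [] => String.ofList ['\n']                                        -- unreachable: split never returns []
  | p0 :: rest => String.ofList (p0 ++ reworklineJoin p0 rest ++ ['\n'])   -- ''.join(out) + '\n'

-- ===== PRECONDITION & SPEC =====
def Spec_reworkline (line : String) (out : String) : Prop := out = reworkline_alt line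
instance (line : String) (out : String) : Decidable (Spec_reworkline line out) := by unfold Spec_reworkline; infer_instance

-- ===== CLAIM (what is proved, stated in full; the proofs are below) =====
def Claim_equal_reworkline : Prop := ∀ (line : String), Dom_reworkline line → Spec_reworkline line (reworkline line)

-- ===== LEMMAS AND PROOFS =====

-- the two characters after a comma are both digits
def q2spec : List Char → Bool
  | a :: b :: _ => PySem.Chars.isdigit a && PySem.Chars.isdigit b
  | _ => false

-- what both programs compute on the truncated line: pn = "previous char is a digit"
def gSpec : Bool → List Char → List Char
  | _, [] => []
  | pn, c :: t => (if c == ',' && pn && q2spec t then '.' else c) :: gSpec (PySem.Chars.isdigit c) t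

-- structural version of s.split(',')
def splitComma : List Char → List (List Char)
  | [] => [[]]
  | c :: t =>
    if c = ',' then [] :: splitComma t
    else (c :: (splitComma t).headI) :: (splitComma t).tail

lemma splitComma_ne_nil (t : List Char) : splitComma t ≠ [] := by
  cases t with
  | nil => simp [splitComma]
  | cons c t => unfold splitComma; split <;> simp

lemma strIsdigit_singleton (c : Char) :
    PySem.Chars.strIsdigit [c] = PySem.Chars.isdigit c := by
  simp [PySem.Chars.strIsdigit]

-- ---------- A side ----------

lemma step_eq (out : List Char) (c : Char) (t prev : List Char) :
    reworklineStep (out ++ c :: t, prev) ((out.length : Int), c) =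
      (if c == ',' && PySem.Chars.strIsdigit prev && q2spec t
        then (out ++ ['.']) ++ t else (out ++ [c]) ++ t, [c]) := by
  have hget1 : PySem.List.pyGet? (out ++ c :: t) ((out.length : Int) + 1) = t[0]? := by
    rw [show ((out.length : Int) + 1) = ((out.length + 1 : Nat) : Int) by push_cast; ring,
        PySem.List.pyGet?_natCast, List.getElem?_append_right (by omega)]
    simp
  have hget2 : PySem.List.pyGet? (out ++ c :: t) ((out.length : Int) + 2) = t[1]? := by
    rw [show ((out.length : Int) + 2) = ((out.length + 2 : Nat) : Int) by push_cast; ring,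
        PySem.List.pyGet?_natCast, List.getElem?_append_right (by omega)]
    simp [show out.length + 2 - out.length = 2 by omega]
  have hrepl : PySem.List.slice (out ++ c :: t) none (some (out.length : Int)) ++ ['.'] ++
      PySem.List.slice (out ++ c :: t) (some ((out.length : Int) + 1)) none = (out ++ ['.']) ++ t := by
    rw [PySem.List.slice_to_natCast, List.take_left,
        show ((out.length : Int) + 1) = ((out.length + 1 : Nat) : Int) by push_cast; ring,
        PySem.List.slice_from_natCast, List.drop_append]
    simp
  cases hcp : (c == ',' && PySem.Chars.strIsdigit prev) with
  | false =>
    simp only [reworklineStep, hcp, Bool.false_eq_true, if_false, Bool.false_and]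
    simp
  | true =>
    simp only [reworklineStep, hcp, if_true, Bool.true_and, hget1]
    match t with
    | [] => simp [q2spec]
    | [a] =>
      simp only [List.getElem?_cons_zero, strIsdigit_singleton, q2spec]
      cases ha : PySem.Chars.isdigit a <;> simp [hget2]
    | a :: b :: t' =>
      simp only [List.getElem?_cons_zero, strIsdigit_singleton, q2spec]
      by_cases ha : PySem.Chars.isdigit a = true
      · simp only [ha, if_true, hget2, List.getElem?_cons_succ, List.getElem?_cons_zero,
                   Bool.true_and]
        by_cases hb : PySem.Chars.isdigit b = true
        · have hdrop : PySem.List.slice (out ++ c :: a :: b :: t') (some ((out.length : Int) + 1)) none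
              = a :: b :: t' := by
            rw [show ((out.length : Int) + 1) = ((out.length + 1 : Nat) : Int) by push_cast; ring,
                PySem.List.slice_from_natCast, List.drop_append]
            simp
          simp [hb, hdrop]
        · simp only [Bool.not_eq_true] at hb
          simp [hb]
      · simp only [Bool.not_eq_true] at ha
        simp [ha]

lemma loopA : ∀ (t out prev : List Char),
    ((PySem.List.enumerate t (out.length : Int)).foldl reworklineStep (out ++ t, prev)).1
      = out ++ gSpec (PySem.Chars.strIsdigit prev) t := by
  intro t
  induction t with
  | nil => intro out prev; simp [PySem.List.enumerate, gSpec]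
  | cons c t ih =>
    intro out prev
    rw [PySem.List.enumerate_cons, List.foldl_cons, step_eq]
    cases hcond : (c == ',' && PySem.Chars.strIsdigit prev && q2spec t) with
    | true =>
      simp only [if_true]
      rw [show ((out.length : Int) + 1) = (((out ++ ['.']).length : Nat) : Int) by simp]
      rw [ih (out ++ ['.']) [c]]
      simp only [gSpec, hcond, if_true, strIsdigit_singleton]
      simp
    | false =>
      simp only [Bool.false_eq_true, if_false]
      rw [show ((out.length : Int) + 1) = (((out ++ [c]).length : Nat) : Int) by simp]
      rw [ih (out ++ [c]) [c]]
      simp only [gSpec, hcond, Bool.false_eq_true, if_false, strIsdigit_singleton]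
      simp

lemma A_char (line : String) :
    reworkline line
      = String.ofList (gSpec false (PySem.List.slice line.toList none (some (-2))) ++ ['\n']) := by
  have h := loopA (PySem.List.slice line.toList none (some (-2))) [] []
  simp only [List.length_nil, Nat.cast_zero, List.nil_append] at h
  rw [show reworkline line = String.ofList
        ((List.foldl reworklineStep (PySem.List.slice line.toList none (some (-2)), [])
          (PySem.List.enumerate (PySem.List.slice line.toList none (some (-2))) 0)).1 ++ ['\n'])
      from rfl, h]
  simp [PySem.Chars.strIsdigit]

-- ---------- B side ----------

lemma splitOn_go_eq : ∀ (l : List Char) (fuel : Nat) (cur : List Char) (acc : List (List Char)),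
    l.length ≤ fuel →
    PySem.Chars.splitOn.go [','] fuel l cur acc
      = acc.reverse ++ (cur.reverse ++ (splitComma l).headI) :: (splitComma l).tail := by
  intro l
  induction l with
  | nil =>
    intro fuel cur acc h
    cases fuel <;> simp [PySem.Chars.splitOn.go, splitComma]
  | cons c t ih =>
    intro fuel cur acc h
    cases fuel with
    | zero => simp at h
    | succ f =>
      by_cases hc : c = ','
      · subst hc
        have hp : [','].isPrefixOf (',' :: t) = true := by simp [List.isPrefixOf]
        rw [PySem.Chars.splitOn.go]
        simp only [hp, if_true, List.length_cons, List.length_nil, List.drop_succ_cons, List.drop_zero]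
        rw [ih f [] (cur.reverse :: acc) (by simpa using Nat.lt_succ_iff.mp (by simpa using h))]
        obtain ⟨q, rest, hq⟩ := List.exists_cons_of_ne_nil (splitComma_ne_nil t)
        simp [splitComma, hq]
      · have hp : [','].isPrefixOf (c :: t) = false := by
          simp [List.isPrefixOf]
          exact fun h' => (hc h'.symm).elim
        rw [PySem.Chars.splitOn.go]
        simp only [hp, if_false, Bool.false_eq_true]
        rw [ih f (c :: cur) acc (by simpa using Nat.lt_succ_iff.mp (by simpa using h))]
        simp [splitComma, hc]

lemma splitOn_eq_splitComma (s : List Char) :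
    PySem.Chars.splitOn s [','] = splitComma s := by
  unfold PySem.Chars.splitOn
  rw [splitOn_go_eq s (s.length + 1) [] [] (by omega)]
  obtain ⟨q, rest, hq⟩ := List.exists_cons_of_ne_nil (splitComma_ne_nil s)
  simp [hq]

lemma prevNum_nil : reworklinePrevNum [] = false := by simp [reworklinePrevNum]

lemma prevNum_snoc (p : List Char) (c : Char) :
    reworklinePrevNum (p ++ [c]) = PySem.Chars.isdigit c := by
  simp [reworklinePrevNum, PySem.List.pyGet?, PySem.List.pyIdx?, strIsdigit_singleton]

lemma isdigit_comma : PySem.Chars.isdigit ',' = false := by decide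

lemma nextNum_head (t : List Char) :
    reworklineNextNum ((splitComma t).headI) = q2spec t := by
  match t with
  | [] => simp [splitComma, reworklineNextNum, q2spec]
  | [a] =>
    by_cases ha : a = ','
    · subst ha; simp [splitComma, reworklineNextNum, q2spec]
    · simp [splitComma, ha, reworklineNextNum, q2spec, PySem.List.pyGet?, PySem.List.pyIdx?]
  | a :: b :: v =>
    by_cases ha : a = ','
    · subst ha; simp [splitComma, reworklineNextNum, q2spec, isdigit_comma]
    · by_cases hb : b = ','
      · subst hb
        simp [splitComma, ha, reworklineNextNum, q2spec, isdigit_comma,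
              PySem.List.pyGet?, PySem.List.pyIdx?]
      · simp only [splitComma, if_neg ha, if_neg hb, List.headI_cons, q2spec]
        have hpos : (0:Int) ≤ ((splitComma v).headI.length : Int) + 1 := by positivity
        simp [reworklineNextNum, PySem.List.pyGet?, PySem.List.pyIdx?, strIsdigit_singleton, hpos]

lemma keyB : ∀ (t pfx : List Char),
    (splitComma t).headI ++ reworklineJoin (pfx ++ (splitComma t).headI) (splitComma t).tail
      = gSpec (reworklinePrevNum pfx) t := by
  intro t
  induction t with
  | nil => intro pfx; simp [splitComma, reworklineJoin, gSpec]
  | cons c t ih =>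
    intro pfx
    by_cases hc : c = ','
    · subst hc
      obtain ⟨q, rest, hq⟩ := List.exists_cons_of_ne_nil (splitComma_ne_nil t)
      have h1 := ih []
      have h2 := nextNum_head t
      rw [hq] at h1 h2
      simp only [List.headI_cons, List.nil_append, List.tail_cons, prevNum_nil] at h1
      simp only [List.headI_cons] at h2
      simp only [splitComma, if_true, List.headI_cons, List.tail_cons, hq]
      simp only [reworklineJoin, List.append_nil, List.nil_append, gSpec, isdigit_comma]
      simp [h1, h2]
    · obtain ⟨q, rest, hq⟩ := List.exists_cons_of_ne_nil (splitComma_ne_nil t)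
      have h1 := ih (pfx ++ [c])
      rw [hq] at h1
      simp only [List.headI_cons, List.tail_cons] at h1
      simp only [splitComma, if_neg hc, hq, List.headI_cons, List.tail_cons]
      have hcb : (c == ',') = false := by simp [hc]
      simp only [gSpec, hcb, Bool.false_and, Bool.false_eq_true, if_false]
      rw [show pfx ++ c :: q = (pfx ++ [c]) ++ q by simp]
      simp only [List.cons_append]
      rw [h1, prevNum_snoc]

lemma B_char (line : String) :
    reworkline_alt line
      = String.ofList (gSpec false (PySem.List.slice line.toList none (some (-2))) ++ ['\n']) := by
  obtain ⟨q, rest, hq⟩ :=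
    List.exists_cons_of_ne_nil (splitComma_ne_nil (PySem.List.slice line.toList none (some (-2))))
  have h := keyB (PySem.List.slice line.toList none (some (-2))) []
  rw [hq] at h
  simp only [List.headI_cons, List.tail_cons, List.nil_append, prevNum_nil] at h
  rw [show reworkline_alt line =
      (match PySem.Chars.splitOn (PySem.List.slice line.toList none (some (-2))) [','] with
        | [] => String.ofList ['\n']
        | p0 :: rest => String.ofList (p0 ++ reworklineJoin p0 rest ++ ['\n'])) from rfl]
  rw [splitOn_eq_splitComma, hq]
  rw [← h]

-- ===== VERDICT (by name: the statement is the Claim_ definition above) =====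
theorem reworkline_spec : Claim_equal_reworkline := by
  intro line _
  unfold Spec_reworkline
  rw [A_char, B_char]
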